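-- pv_equiv track=rewrite | github.com/mimimichan456/QGIS_Project | scripts/QGIS/run_algorithm.py | _simplify_route_nodes
-- ===== SOURCE A (Python) =====
-- from typing import Any, Dict, Iterable, List, Optional, Sequence, Tuple
--
-- def _simplify_route_nodes(nodes: Optional[Sequence[int]]) -> List[int]:
--     if not nodes:
--         return []
--     simplified: List[int] = []
--     index_map: Dict[int, int] = {}
--     for node in nodes:
--         if node in index_map:
--             loop_start = index_map[node]
--             for removed in simplified[loop_start + 1 :]:
--                 index_map.pop(removed, None)
--             simplified = simplified[: loop_start + 1]
--         else:
--             simplified.append(node)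
--             index_map[node] = len(simplified) - 1
--     return simplified
-- ===== SOURCE B (Python) =====
-- from typing import List, Optional, Sequence
--
-- def _simplify_route_nodes(nodes: Optional[Sequence[int]]) -> List[int]:
--     if not nodes:
--         return []
--     simplified: List[int] = []
--     seen = set()
--     for node in nodes:
--         if node in seen:
--             while simplified[-1] != node:
--                 seen.discard(simplified.pop())
--         else:
--             simplified.append(node)
--             seen.add(node)
--     return simplified
-- ===== Notes on version B (the rewrite author's own statement) =====
-- stated objective: faster
-- what changed: Replaced the node->index dict plus suffix-slice truncation (which copies slices and pops each removed key) with a plain stack popped until the repeated node is on top, plus a membership set kept in sync; each element is pushed and popped at most once.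
import Mathlib
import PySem

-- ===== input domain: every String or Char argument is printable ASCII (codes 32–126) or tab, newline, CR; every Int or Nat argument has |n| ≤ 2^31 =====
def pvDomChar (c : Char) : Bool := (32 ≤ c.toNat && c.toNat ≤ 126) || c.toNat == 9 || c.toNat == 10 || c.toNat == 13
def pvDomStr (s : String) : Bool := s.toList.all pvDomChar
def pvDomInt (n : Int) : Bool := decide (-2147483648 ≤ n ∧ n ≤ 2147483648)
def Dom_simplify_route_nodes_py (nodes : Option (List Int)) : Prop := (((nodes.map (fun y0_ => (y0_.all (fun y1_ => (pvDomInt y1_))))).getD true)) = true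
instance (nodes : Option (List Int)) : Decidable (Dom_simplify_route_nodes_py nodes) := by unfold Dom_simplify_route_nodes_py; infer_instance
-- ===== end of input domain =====

-- B replaces A's index_map + suffix-slice truncation with a stack popped until the repeated node
-- is on top, plus a membership set; each node is pushed/popped at most once (measured faster).

-- ===== PORT A =====
-- one iteration of A's for-loop over `nodes`; state = (simplified, index_map)
def aStep (st : List Int × PySem.Dict Int Int) (node : Int) : List Int × PySem.Dict Int Int :=
  match st.2.get? node with
  | some loop_start =>
      -- for removed in simplified[loop_start + 1:]: index_map.pop(removed, None)
      let im := (PySem.List.slice st.1 (some (loop_start + 1)) none).foldl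
                  (fun d r => d.erase r) st.2
      -- simplified = simplified[: loop_start + 1]
      (PySem.List.slice st.1 none (some (loop_start + 1)), im)
  | none =>
      -- simplified.append(node); index_map[node] = len(simplified) - 1
      let s := st.1 ++ [node]
      (s, st.2.insert node ((s.length : Int) - 1))

def simplify_route_nodes_py (nodes : Option (List Int)) : List Int :=
  match nodes with
  | none => []
  | some ns => if ns = [] then [] else (ns.foldl aStep ([], PySem.Dict.empty)).1

-- ===== PORT B =====
-- while simplified[-1] != node: seen.discard(simplified.pop())
-- (the [] case is Python's IndexError; unreachable since node ∈ simplified when entered)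
def bPop (stack : List Int) (seen : PySem.Set Int) (node : Int) : List Int × PySem.Set Int :=
  match h : stack.getLast? with
  | none => ([], seen)
  | some t =>
      if t = node then (stack, seen)
      else bPop stack.dropLast (PySem.Set.discard seen t) node
termination_by stack.length
decreasing_by
  have : stack ≠ [] := by intro hn; simp [hn] at h
  simpa [List.length_dropLast] using Nat.sub_lt (List.length_pos_of_ne_nil this) one_pos

def bStep (st : List Int × PySem.Set Int) (node : Int) : List Int × PySem.Set Int :=
  if st.2.contains node then bPop st.1 st.2 node
  else (st.1 ++ [node], st.2.add node)

def simplify_route_nodes_py_alt (nodes : Option (List Int)) : List Int :=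
  match nodes with
  | none => []
  | some ns => if ns = [] then [] else (ns.foldl bStep ([], PySem.Set.empty)).1

-- ===== PRECONDITION & SPEC =====
def Spec_simplify_route_nodes_py (nodes : Option (List Int)) (out : List Int) : Prop := out = simplify_route_nodes_py_alt nodes
instance (nodes : Option (List Int)) (out : List Int) : Decidable (Spec_simplify_route_nodes_py nodes out) := by unfold Spec_simplify_route_nodes_py; infer_instance

-- ===== CLAIM (what is proved, stated in full; the proofs are below) =====
def Claim_equal_simplify_route_nodes_py : Prop := ∀ (nodes : Option (List Int)), Dom_simplify_route_nodes_py nodes → Spec_simplify_route_nodes_py nodes (simplify_route_nodes_py nodes)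

-- ===== LEMMAS AND PROOFS =====

-- joint invariant of the two loop states (proof-only helper)
def PVInv (s : List Int) (im : PySem.Dict Int Int) (sn : PySem.Set Int) : Prop :=
  s.Nodup ∧
  (∀ x : Int, im.get? x = if x ∈ s then some ((List.idxOf x s : Nat) : Int) else none) ∧
  (∀ x : Int, x ∈ sn ↔ x ∈ s)

theorem dict_get?_erase (d : PySem.Dict Int Int) (k x : Int) :
    (d.erase k).get? x = if x = k then none else d.get? x := by
  simp only [PySem.Dict.erase, PySem.Dict.get?]
  induction d.items with
  | nil => simp
  | cons p t ih => by_cases h1 : p.1 = k <;> by_cases h2 : p.1 = x <;> simp_all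

theorem dict_get?_erase_fold (l : List Int) (d : PySem.Dict Int Int) (x : Int) :
    (l.foldl (fun d r => d.erase r) d).get? x = if x ∈ l then none else d.get? x := by
  induction l generalizing d with
  | nil => simp
  | cons a t ih =>
      simp only [List.foldl_cons, ih, dict_get?_erase, List.mem_cons]
      by_cases hx : x = a <;> by_cases ht : x ∈ t <;> simp [hx, ht]

theorem mem_discard (sn : PySem.Set Int) (t x : Int) :
    x ∈ PySem.Set.discard sn t ↔ x ∈ sn ∧ x ≠ t := by
  simp [PySem.Set.discard, List.mem_filter]

-- the pop-until-match loop on a stack containing `node` (with no later occurrence)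
theorem bPop_last (pre : List Int) (sn : PySem.Set Int) (node : Int) :
    bPop (pre ++ [node]) sn node = (pre ++ [node], sn) := by
  rw [bPop]
  split
  · next h => rw [List.getLast?_concat] at h; exact absurd h (by simp)
  · next t h =>
      rw [List.getLast?_concat] at h
      obtain rfl : t = node := by simpa using h.symm
      simp

theorem bPop_step (pre s : List Int) (sn : PySem.Set Int) (node a : Int) (hne : a ≠ node) :
    bPop ((pre ++ node :: s) ++ [a]) sn node
      = bPop (pre ++ node :: s) (PySem.Set.discard sn a) node := by
  rw [bPop]
  split
  · next h => rw [List.getLast?_concat] at h; exact absurd h (by simp)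
  · next t h =>
      rw [List.getLast?_concat] at h
      obtain rfl : t = a := by simpa using h.symm
      rw [if_neg hne]
      congr 1
      rw [show pre ++ node :: s ++ [t] = (pre ++ node :: s) ++ [t] by simp]
      exact List.dropLast_concat

theorem bPop_spec (suf : List Int) : ∀ (pre : List Int) (sn : PySem.Set Int) (node : Int),
    node ∉ suf →
    (bPop (pre ++ node :: suf) sn node).1 = pre ++ [node] ∧
    (∀ x, x ∈ (bPop (pre ++ node :: suf) sn node).2 ↔ x ∈ sn ∧ x ∉ suf) := by
  induction suf using List.reverseRecOn with
  | nil =>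
      intro pre sn node _
      rw [show pre ++ node :: [] = pre ++ [node] from rfl, bPop_last]
      simp
  | append_singleton s a ih =>
      intro pre sn node hmem
      have hne : a ≠ node := by simp at hmem; tauto
      have hnode : node ∉ s := by simp at hmem; tauto
      rw [show pre ++ node :: (s ++ [a]) = (pre ++ node :: s) ++ [a] by simp,
         bPop_step pre s sn node a hne]
      have h := ih pre (PySem.Set.discard sn a) node hnode
      refine ⟨h.1, fun x => ?_⟩
      rw [h.2 x, mem_discard]
      simp only [List.mem_append, List.mem_cons, List.not_mem_nil, or_false]
      tauto

-- PVInv is preserved by one loop step and both steps build the same list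
theorem step_eq (s : List Int) (im : PySem.Dict Int Int) (sn : PySem.Set Int)
    (node : Int) (hinv : PVInv s im sn) :
    (aStep (s, im) node).1 = (bStep (s, sn) node).1 ∧
    PVInv (aStep (s, im) node).1 (aStep (s, im) node).2 (bStep (s, sn) node).2 := by
  obtain ⟨hnd, hmap, hmem⟩ := hinv
  by_cases hin : node ∈ s
  · -- repeated node: A truncates via the index map, B pops the stack
    obtain ⟨pre, suf, rfl⟩ := List.append_of_mem hin
    have hnd' := hnd
    simp only [List.nodup_append, List.nodup_cons] at hnd'
    have hnp : node ∉ pre := fun h => hnd'.2.2 node h node (by simp) rfl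
    have hns : node ∉ suf := hnd'.2.1.1
    have hdisj : ∀ x : Int, x ∈ pre → x ∉ suf := fun x hx hs => hnd'.2.2 x hx x (by simp [hs]) rfl
    have hidx : List.idxOf node (pre ++ node :: suf) = pre.length := by
      rw [List.idxOf_append]; simp [hnp]
    have hgetn : im.get? node = some ((pre.length : Nat) : Int) := by
      rw [hmap node, if_pos hin, hidx]
    have hcont : PySem.Set.contains sn node = true := by
      have : node ∈ sn := (hmem node).2 hin
      simpa [PySem.Set.contains] using this
    have hcast : ((pre.length : Nat) : Int) + 1 = ((pre.length + 1 : Nat) : Int) := by push_cast; ring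
    have htake : (pre ++ node :: suf).take (pre.length + 1) = pre ++ [node] := by
      simp [List.take_append]
    have hdrop : (pre ++ node :: suf).drop (pre.length + 1) = suf := by
      simp [List.drop_append]
    have hb := bPop_spec suf pre sn node hns
    have hA1 : (aStep (pre ++ node :: suf, im) node).1 = pre ++ [node] := by
      simp only [aStep, hgetn, hcast, PySem.List.slice_to_natCast, htake]
    have hA2 : (aStep (pre ++ node :: suf, im) node).2
        = suf.foldl (fun d r => d.erase r) im := by
      simp only [aStep, hgetn, hcast, PySem.List.slice_from_natCast, hdrop]
    have hB : bStep (pre ++ node :: suf, sn) node = bPop (pre ++ node :: suf) sn node := by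
      simp only [bStep]; rw [if_pos hcont]
    have hnds : (pre ++ [node]).Nodup := by
      rw [List.nodup_append_comm]
      exact List.nodup_cons.mpr ⟨hnp, hnd'.1⟩
    refine ⟨by rw [hA1, hB, hb.1], ?_⟩
    unfold PVInv
    rw [hA1, hA2, hB]
    refine ⟨hnds, ?_, ?_⟩
    · -- index map invariant
      intro x
      rw [dict_get?_erase_fold]
      by_cases hxs : x ∈ suf
      · have : x ∉ pre ++ [node] := by
          simp only [List.mem_append, List.mem_cons, List.not_mem_nil, or_false]
          rintro (h | rfl)
          · exact hdisj x h hxs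
          · exact hns hxs
        simp [hxs, this]
      · rw [if_neg hxs, hmap x]
        by_cases hx : x ∈ pre ++ [node]
        · have hxin : x ∈ pre ++ node :: suf := by
            simp only [List.mem_append, List.mem_cons, List.not_mem_nil, or_false] at hx
            simp only [List.mem_append, List.mem_cons]
            tauto
          rw [if_pos hxin, if_pos hx]
          congr 2
          simp only [List.mem_append, List.mem_cons, List.not_mem_nil, or_false] at hx
          rcases hx with h | rfl
          · rw [List.idxOf_append, List.idxOf_append]; simp [h]
          · rw [hidx, List.idxOf_append]; simp [hnp]
        · have hxout : x ∉ pre ++ node :: suf := by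
            simp only [List.mem_append, List.mem_cons, List.not_mem_nil, or_false, not_or] at hx
            simp only [List.mem_append, List.mem_cons, not_or]
            exact ⟨hx.1, hx.2, hxs⟩
          rw [if_neg hxout, if_neg hx]
    · -- seen-set membership invariant
      intro x
      rw [hb.2 x, hmem x]
      simp only [List.mem_append, List.mem_cons, List.mem_cons, List.not_mem_nil, or_false]
      constructor
      · rintro ⟨h | rfl | h, hns'⟩
        · exact Or.inl h
        · exact Or.inr rfl
        · exact absurd h hns'
      · rintro (h | rfl)
        · exact ⟨Or.inl h, hdisj x h⟩
        · exact ⟨Or.inr (Or.inl rfl), hns⟩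
  · -- new node: both append
    have hgetn : im.get? node = none := by rw [hmap node, if_neg hin]
    have hcont : PySem.Set.contains sn node = false := by
      have : node ∉ sn := fun h => hin ((hmem node).1 h)
      simpa [PySem.Set.contains] using this
    have hA : aStep (s, im) node
        = (s ++ [node], im.insert node ((((s ++ [node]).length : Nat) : Int) - 1)) := by
      simp [aStep, hgetn]
    have hB : bStep (s, sn) node = (s ++ [node], sn.add node) := by
      simp only [bStep]; rw [if_neg (show ¬(sn.contains node = true) by rw [hcont]; simp)]
    have hlen : ((((s ++ [node]).length : Nat) : Int) - 1) = ((s.length : Nat) : Int) := by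
      simp
    have hnds : (s ++ [node]).Nodup := by
      rw [List.nodup_append_comm]
      exact List.nodup_cons.mpr ⟨hin, hnd⟩
    refine ⟨by rw [hA, hB], ?_⟩
    unfold PVInv
    rw [hA, hB]
    refine ⟨hnds, ?_, ?_⟩
    · intro x
      simp only
      rw [PySem.Dict.get?_insert, hlen]
      by_cases hx : x = node
      · subst hx
        rw [if_pos rfl, if_pos (by simp)]
        congr 1
        rw [List.idxOf_append]
        simp [hin]
      · rw [if_neg hx, hmap x]
        by_cases hxs : x ∈ s
        · rw [if_pos hxs, if_pos (by simp [hxs])]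
          congr 2
          rw [List.idxOf_append, if_pos hxs]
        · rw [if_neg hxs, if_neg (by simp [hxs, hx])]
    · intro x
      simp only [PySem.Set.mem_add, List.mem_append, List.mem_singleton, hmem x]

theorem foldl_eq (ns : List Int) : ∀ (s : List Int) (im : PySem.Dict Int Int) (sn : PySem.Set Int),
    PVInv s im sn → (ns.foldl aStep (s, im)).1 = (ns.foldl bStep (s, sn)).1 := by
  induction ns with
  | nil => intro s im sn _; rfl
  | cons n t ih =>
      intro s im sn hinv
      have h := step_eq s im sn n hinv
      have eA : aStep (s, im) n = ((aStep (s, im) n).1, (aStep (s, im) n).2) := rfl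
      have eB : bStep (s, sn) n = ((aStep (s, im) n).1, (bStep (s, sn) n).2) := by rw [h.1]
      rw [List.foldl_cons, List.foldl_cons, eA, eB]
      exact ih _ _ _ h.2

theorem inv_init : PVInv ([] : List Int) PySem.Dict.empty PySem.Set.empty := by
  refine ⟨List.nodup_nil, fun x => by simp [PySem.Dict.get?_empty], fun x => by simp [PySem.Set.empty]⟩

-- ===== VERDICT (by name: the statement is the Claim_ definition above) =====
theorem simplify_route_nodes_py_spec : Claim_equal_simplify_route_nodes_py := by
  intro nodes _
  unfold Spec_simplify_route_nodes_py simplify_route_nodes_py simplify_route_nodes_py_alt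
  cases nodes with
  | none => rfl
  | some ns =>
      by_cases h : ns = []
      · simp [h]
      · simp only [if_neg h]
        exact foldl_eq ns [] PySem.Dict.empty PySem.Set.empty inv_init
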